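-- pv_equiv track=rewrite | github.com/HypnoSphynx/BRAC_University_CS | CSE421/Lab 03/TASK 2/server.py | count_vowles
-- ===== SOURCE A (Python) =====
-- def count_vowles(message):
--     vowels = "AEIOUaeiou"
--     count = 0
--     for char in message:
--         if char in vowels:
--             count += 1
--
--     if count == 0:
--         return "Not Enough Vowels"
--     elif count<=2:
--         return "Enough Vowels I guess"
--     elif count>2:
--         return "Too many vowels"
-- ===== SOURCE B (Python) =====
-- def count_vowles(message):
--     # Build a full character-frequency table once, then sum the fixed vowel keys.
--     freq = {}
--     for ch in message:
--         freq[ch] = freq.get(ch, 0) + 1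
--     count = sum(freq.get(v, 0) for v in "AEIOUaeiou")
--     if count == 0:
--         return "Not Enough Vowels"
--     elif count <= 2:
--         return "Enough Vowels I guess"
--     elif count > 2:
--         return "Too many vowels"
-- ===== Notes on version B (the rewrite author's own statement) =====
-- stated objective: alternative
-- what changed: B builds a frequency table of all characters in one pass and then sums the counts of the ten fixed vowel keys, instead of testing every message character for vowel membership inside the loop.
import Mathlib
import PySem

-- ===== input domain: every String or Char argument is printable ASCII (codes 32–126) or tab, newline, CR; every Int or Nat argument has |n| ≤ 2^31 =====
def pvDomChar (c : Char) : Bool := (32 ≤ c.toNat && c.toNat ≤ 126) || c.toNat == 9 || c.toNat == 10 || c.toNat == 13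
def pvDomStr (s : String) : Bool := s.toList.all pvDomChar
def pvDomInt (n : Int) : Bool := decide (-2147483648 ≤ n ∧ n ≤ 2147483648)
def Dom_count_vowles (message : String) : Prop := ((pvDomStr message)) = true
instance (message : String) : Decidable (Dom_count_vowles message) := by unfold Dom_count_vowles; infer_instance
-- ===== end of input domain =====

-- B builds a character-frequency table in one pass and sums the ten fixed vowel keys,
-- instead of testing each message character for vowel membership (objective: alternative).

-- ===== PORT A =====
-- literal port of A: one pass over the message, counting characters that are vowels,
-- then the three-way bucket chain (the final `elif count > 2` is exhaustive, so it is the else).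
def count_vowles (message : String) : String :=
  let vowels : List Char := "AEIOUaeiou".toList
  let count : Int := message.toList.foldl (fun n c => if vowels.contains c then n + 1 else n) 0
  if count = 0 then "Not Enough Vowels"
  else if count ≤ 2 then "Enough Vowels I guess"
  else "Too many vowels"

-- ===== PORT B =====
-- port of B: build freq = {ch: multiplicity} over the whole message, then
-- count = sum of freq.get(v, 0) over the fixed vowel keys; same bucket chain.
def count_vowles_alt (message : String) : String :=
  let freq : PySem.Dict Char Int :=
    message.toList.foldl (fun d c => d.insert c (d.getD c 0 + 1)) PySem.Dict.empty
  let count : Int := "AEIOUaeiou".toList.foldl (fun a v => a + freq.getD v 0) 0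
  if count = 0 then "Not Enough Vowels"
  else if count ≤ 2 then "Enough Vowels I guess"
  else "Too many vowels"

-- ===== PRECONDITION & SPEC =====
def Spec_count_vowles (message : String) (out : String) : Prop := out = count_vowles_alt message
instance (message : String) (out : String) : Decidable (Spec_count_vowles message out) := by unfold Spec_count_vowles; infer_instance

-- ===== CLAIM (what is proved, stated in full; the proofs are below) =====
def Claim_equal_count_vowles : Prop := ∀ (message : String), Dom_count_vowles message → Spec_count_vowles message (count_vowles message)

-- ===== LEMMAS AND PROOFS =====

-- A's loop is a countP.
theorem pv_foldl_count (vs : List Char) :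
    ∀ (l : List Char) (n : Int),
      l.foldl (fun n c => if vs.contains c then n + 1 else n) n
        = n + (l.countP (fun c => vs.contains c) : Int) := by
  intro l
  induction l with
  | nil => intro n; simp
  | cons c t ih =>
    intro n
    simp only [List.foldl_cons, List.countP_cons, ih]
    cases h : vs.contains c <;> simp [h] <;> omega

-- B's sum over the vowel keys is a countP too (needs the vowel list to be duplicate-free).
theorem pv_split_countP (a : Char) (vs : List Char) (ha : vs.contains a = false) :
    ∀ l : List Char,
      l.countP (fun c => (a :: vs).contains c)
        = l.count a + l.countP (fun c => vs.contains c) := by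
  intro l
  induction l with
  | nil => simp
  | cons c t ih =>
    rw [List.countP_cons, List.countP_cons, List.count_cons, ih,
        show ((a :: vs).contains c) = ((c == a) || vs.contains c) from List.contains_cons]
    by_cases h1 : c = a
    · subst h1
      rw [ha]
      simp
      omega
    · rw [show (c == a) = false from by simp [h1]]
      cases h2 : vs.contains c <;> simp <;> omega

theorem pv_foldl_sum_counts :
    ∀ (vs : List Char), vs.Nodup → ∀ (l : List Char) (a : Int),
      vs.foldl (fun a v => a + (l.count v : Int)) a
        = a + (l.countP (fun c => vs.contains c) : Int) := by
  intro vs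
  induction vs with
  | nil => intro _ l a; simp
  | cons v vs ih =>
    intro hnd l a
    have hv : vs.contains v = false := by
      simp only [List.nodup_cons] at hnd
      simpa using hnd.1
    simp only [List.foldl_cons]
    rw [ih (by simp_all [List.nodup_cons]) l, pv_split_countP v vs hv l]
    push_cast; ring

-- the two counts agree
theorem pv_counts_eq (l : List Char) :
    l.foldl (fun n c => if ("AEIOUaeiou".toList).contains c then n + 1 else n) (0 : Int)
      = ("AEIOUaeiou".toList).foldl
          (fun a v => a + ((l.foldl (fun d c => d.insert c (d.getD c 0 + 1)) PySem.Dict.empty).getD v 0)) (0 : Int) := by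
  have hfreq : ∀ v : Char,
      (l.foldl (fun d c => d.insert c (d.getD c 0 + 1)) PySem.Dict.empty).getD v 0
        = (l.count v : Int) := by
    intro v
    rw [PySem.Dict.getD_foldl_insert_add_one]
    simp [PySem.Dict.getD_empty]
  have h2 : ("AEIOUaeiou".toList).foldl
      (fun a v => a + ((l.foldl (fun d c => d.insert c (d.getD c 0 + 1)) PySem.Dict.empty).getD v 0)) (0 : Int)
      = ("AEIOUaeiou".toList).foldl (fun a v => a + (l.count v : Int)) (0 : Int) := by
    apply PySem.List.foldl_congr_mem
    intro a v _; rw [hfreq]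
  rw [h2, pv_foldl_count, pv_foldl_sum_counts "AEIOUaeiou".toList (by decide) l]

-- ===== VERDICT (by name: the statement is the Claim_ definition above) =====
theorem count_vowles_spec : Claim_equal_count_vowles := by
  intro message _
  show count_vowles message = count_vowles_alt message
  unfold count_vowles count_vowles_alt
  simp only
  rw [pv_counts_eq message.toList]
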